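-- pv_equiv track=rewrite | github.com/w1kend/leetcode | pytnon/ctci/c5/4_next_number/next_number.py | lower_value_with_the_same_number_of_ones
-- ===== SOURCE A (Python) =====
-- def lower_value_with_the_same_number_of_ones(num: int) -> int:
--     if num == 0:
--         return 0
--     tmp = num
--     zero_idx = -1
--     one_idx = -1
--
--     idx = 0
--     while tmp != 0:
--         if tmp & 1 == 0:
--             zero_idx = idx
--
--         if tmp & 1 == 1:
--             one_idx = idx
--             if zero_idx >= 0:
--                 break
--
--         idx += 1
--         tmp >>= 1
--
--     # didn't find zero
--     if zero_idx == -1: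
--         # there is no lower value with the same number of ones
--         return num
--
--     num = update_bit(num, zero_idx, True)
--     return update_bit(num, one_idx, False)
--
-- def update_bit(num: int, idx: int, one: bool) -> int:
--     num &= ~(1 << idx)  # set a bit at idx to zero
--     if not one:
--         return num
--
--     return num | (1 << idx)
-- ===== SOURCE B (Python) =====
-- def lower_value_with_the_same_number_of_ones(num: int) -> int:
--     if num == 0:
--         return 0
--     z = (num + 1) & -(num + 1)          # lowest zero bit of num, as a single-bit mask
--     higher = num & ~((z << 1) - 1)      # the set bits strictly above that zero
--     if higher == 0:
--         return num                      # num is a block of trailing ones: no lower value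
--     b = higher & -higher                # lowest set bit above the zero
--     return num - (b >> 1)               # flip that '10' to '01'
-- ===== Notes on version B (the rewrite author's own statement) =====
-- stated objective: alternative
-- what changed: A scans the bits one at a time with a while-loop tracking zero/one indices and then patches two bits with update_bit; B is loop-free: z=(num+1)&-(num+1) isolates the lowest zero bit, higher=num&~((z<<1)-1) keeps the set bits above it, and the result is num-((higher&-higher)>>1).
-- outside the precondition, e.g. on lower_value_with_the_same_number_of_ones(-1): A does not finish within the time limit, B returns -1
import Mathlib
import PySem

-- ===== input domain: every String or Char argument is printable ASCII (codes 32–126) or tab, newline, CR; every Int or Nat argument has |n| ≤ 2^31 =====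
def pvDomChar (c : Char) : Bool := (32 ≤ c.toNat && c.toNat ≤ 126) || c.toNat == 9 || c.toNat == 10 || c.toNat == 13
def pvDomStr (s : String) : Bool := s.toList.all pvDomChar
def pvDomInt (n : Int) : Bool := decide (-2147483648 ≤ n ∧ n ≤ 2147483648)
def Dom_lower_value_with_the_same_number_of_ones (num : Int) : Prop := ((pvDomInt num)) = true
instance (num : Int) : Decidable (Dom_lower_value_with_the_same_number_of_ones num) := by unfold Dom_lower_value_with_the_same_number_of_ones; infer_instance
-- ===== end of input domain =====

-- B replaces A's bit-by-bit scanning loop with a closed-form bit-trick computation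
-- (lowest zero via (num+1) & -(num+1), the bit to move via higher & -higher).

-- ===== PORT A =====

-- Python helper: update_bit(num, idx, one).  idx is nonnegative at every call site reached
-- inside Pre_ (Python `1 << idx` would raise ValueError for a negative idx), so `.toNat` is exact there.
def pvUpdateBit (num : Int) (idx : Int) (one : Bool) : Int :=
  let num := PySem.Int.band num (Int.not ((1:Int) <<< idx.toNat))   -- set a bit at idx to zero
  if one = false then num
  else PySem.Int.bor num ((1:Int) <<< idx.toNat)

-- Python: the `while tmp != 0` loop of A, carrying (tmp, zero_idx, one_idx, idx).
-- `fuel` only makes the while-loop total: on the admitted inputs (Dom ∧ Pre_, so |num| ≤ 2^31 and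
-- num ≠ -1) the loop breaks or exits after at most ~35 iterations, far below 100, so fuel is never
-- exhausted there (on num = -1, excluded by Pre_, the Python loop never terminates).
def pvLoopA : Nat → Int → Int → Int → Nat → Int × Int
  | 0, _, zero_idx, one_idx, _ => (zero_idx, one_idx)
  | fuel + 1, tmp, zero_idx, one_idx, idx =>
    if tmp = 0 then (zero_idx, one_idx)
    else
      let zero_idx := if PySem.Int.band tmp 1 = 0 then (idx : Int) else zero_idx
      if PySem.Int.band tmp 1 = 1 then
        let one_idx := (idx : Int)
        if zero_idx ≥ 0 then (zero_idx, one_idx)          -- break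
        else pvLoopA fuel (tmp >>> (1:Nat)) zero_idx one_idx (idx + 1)
      else pvLoopA fuel (tmp >>> (1:Nat)) zero_idx one_idx (idx + 1)

def lower_value_with_the_same_number_of_ones (num : Int) : Int :=
  if num = 0 then 0
  else
    let r := pvLoopA 100 num (-1) (-1) 0
    if r.1 = -1 then num                                  -- didn't find zero
    else pvUpdateBit (pvUpdateBit num r.1 true) r.2 false

-- ===== PORT B =====
def lower_value_with_the_same_number_of_ones_alt (num : Int) : Int :=
  if num = 0 then 0
  else
    let z := PySem.Int.band (num + 1) (-(num + 1))
    let higher := PySem.Int.band num (Int.not ((z <<< (1:Nat)) - 1))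
    if higher = 0 then num
    else
      let b := PySem.Int.band higher (-higher)
      num - (b >>> (1:Nat))

-- ===== PRECONDITION & SPEC =====
-- Pre_ excludes only num = -1: there A's `while tmp != 0` loop never terminates
-- (in Python -1 >> 1 == -1), so A returns on every input admitted by Pre_
-- and Pre_ excludes nothing on which A returns.
def Pre_lower_value_with_the_same_number_of_ones (num : Int) : Prop := num ≠ -1
instance (num : Int) : Decidable (Pre_lower_value_with_the_same_number_of_ones num) := by
  unfold Pre_lower_value_with_the_same_number_of_ones; infer_instance

def pvWitness_lower_value_with_the_same_number_of_ones : Int := 9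

def Spec_lower_value_with_the_same_number_of_ones (num : Int) (out : Int) : Prop :=
  out = lower_value_with_the_same_number_of_ones_alt num
instance (num : Int) (out : Int) : Decidable (Spec_lower_value_with_the_same_number_of_ones num out) := by
  unfold Spec_lower_value_with_the_same_number_of_ones; infer_instance

-- ===== CLAIM (what is proved, stated in full; the proofs are below) =====
def Claim_equal_lower_value_with_the_same_number_of_ones : Prop :=
  ∀ (num : Int), Dom_lower_value_with_the_same_number_of_ones num →
    Pre_lower_value_with_the_same_number_of_ones num →
    Spec_lower_value_with_the_same_number_of_ones num (lower_value_with_the_same_number_of_ones num)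

-- ===== LEMMAS AND PROOFS =====

-- ## small arithmetic bridges

theorem pv_shiftr1 (m : Int) : m >>> (1:Nat) = m / 2 := by
  rw [Int.shiftRight_eq_div_pow]; norm_num

theorem pv_not_eq (x : Int) : Int.not x = -x - 1 := by
  unfold Int.not
  cases x with
  | ofNat n => simp [Int.negSucc_eq]; omega
  | negSucc n => simp [Int.negSucc_eq]

-- ## Nat-level halving recursions for &&& and |||

theorem pv_N1 (m n : Nat) :
    m &&& n = 2 * (m / 2 &&& n / 2) + (if m % 2 = 1 ∧ n % 2 = 1 then 1 else 0) := by
  apply Nat.eq_of_testBit_eq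
  intro i
  cases i with
  | zero =>
    rw [Nat.testBit_and, Nat.testBit_zero, Nat.testBit_zero, Nat.testBit_zero]
    by_cases h1 : m % 2 = 1 <;> by_cases h2 : n % 2 = 1 <;> simp [h1, h2]
  | succ i =>
    rw [Nat.testBit_and, ← Nat.testBit_div_two, ← Nat.testBit_div_two, ← Nat.testBit_and,
      ← Nat.testBit_div_two]
    congr 1
    split_ifs <;> omega

theorem pv_N2 (m n : Nat) :
    m ||| n = 2 * (m / 2 ||| n / 2) + (if m % 2 = 1 ∨ n % 2 = 1 then 1 else 0) := by
  apply Nat.eq_of_testBit_eq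
  intro i
  cases i with
  | zero =>
    rw [Nat.testBit_or, Nat.testBit_zero, Nat.testBit_zero, Nat.testBit_zero]
    by_cases h1 : m % 2 = 1 <;> by_cases h2 : n % 2 = 1 <;> simp [h1, h2]
  | succ i =>
    rw [Nat.testBit_or, ← Nat.testBit_div_two, ← Nat.testBit_div_two, ← Nat.testBit_or,
      ← Nat.testBit_div_two]
    congr 1
    split_ifs <;> omega

-- ## Int-level halving recursions for PySem's band / bor

theorem pv_M1 (a b : Int) :
    PySem.Int.band a b
      = 2 * PySem.Int.band (a / 2) (b / 2) + (if a % 2 = 1 ∧ b % 2 = 1 then 1 else 0) := by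
  unfold PySem.Int.band
  by_cases ha : (0:Int) ≤ a <;> by_cases hb : (0:Int) ≤ b
  · rw [if_pos ha, if_pos hb, if_pos (by omega : (0:Int) ≤ a / 2), if_pos (by omega : (0:Int) ≤ b / 2),
      show (a/2).toNat = a.toNat / 2 from by omega, show (b/2).toNat = b.toNat / 2 from by omega,
      pv_N1 a.toNat b.toNat]
    have h1 := @Nat.and_le_left (a.toNat / 2) (b.toNat / 2)
    split_ifs <;> push_cast <;> omega
  · rw [if_pos ha, if_neg hb, if_pos (by omega : (0:Int) ≤ a / 2),
      if_neg (by omega : ¬ (0:Int) ≤ b / 2),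
      show (a/2).toNat = a.toNat / 2 from by omega,
      show (-(b/2) - 1).toNat = (-b - 1).toNat / 2 from by omega,
      pv_N1 a.toNat (-b - 1).toNat]
    have h1 := @Nat.and_le_left (a.toNat / 2) ((-b - 1).toNat / 2)
    have h2 := @Nat.and_le_left a.toNat (-b - 1).toNat
    split_ifs <;> omega
  · rw [if_neg ha, if_pos hb, if_neg (by omega : ¬ (0:Int) ≤ a / 2),
      if_pos (by omega : (0:Int) ≤ b / 2),
      show (b/2).toNat = b.toNat / 2 from by omega,
      show (-(a/2) - 1).toNat = (-a - 1).toNat / 2 from by omega,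
      pv_N1 b.toNat (-a - 1).toNat]
    have h1 := @Nat.and_le_left (b.toNat / 2) ((-a - 1).toNat / 2)
    have h2 := @Nat.and_le_left b.toNat (-a - 1).toNat
    split_ifs <;> omega
  · rw [if_neg ha, if_neg hb,
      if_neg (by omega : ¬ (0:Int) ≤ a / 2), if_neg (by omega : ¬ (0:Int) ≤ b / 2),
      show (-(a/2) - 1).toNat = (-a - 1).toNat / 2 from by omega,
      show (-(b/2) - 1).toNat = (-b - 1).toNat / 2 from by omega,
      pv_N2 (-a - 1).toNat (-b - 1).toNat]
    split_ifs <;> push_cast <;> omega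

theorem pv_M2 (a b : Int) :
    PySem.Int.bor a b
      = 2 * PySem.Int.bor (a / 2) (b / 2) + (if a % 2 = 1 ∨ b % 2 = 1 then 1 else 0) := by
  unfold PySem.Int.bor
  by_cases ha : (0:Int) ≤ a <;> by_cases hb : (0:Int) ≤ b
  · rw [if_pos ha, if_pos hb, if_pos (by omega : (0:Int) ≤ a / 2), if_pos (by omega : (0:Int) ≤ b / 2),
      show (a/2).toNat = a.toNat / 2 from by omega, show (b/2).toNat = b.toNat / 2 from by omega,
      pv_N2 a.toNat b.toNat]
    split_ifs <;> push_cast <;> omega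
  · rw [if_pos ha, if_neg hb, if_pos (by omega : (0:Int) ≤ a / 2),
      if_neg (by omega : ¬ (0:Int) ≤ b / 2),
      show (a/2).toNat = a.toNat / 2 from by omega,
      show (-(b/2) - 1).toNat = (-b - 1).toNat / 2 from by omega,
      pv_N1 (-b - 1).toNat a.toNat]
    have h1 := @Nat.and_le_left ((-b - 1).toNat / 2) (a.toNat / 2)
    have h2 := @Nat.and_le_left (-b - 1).toNat a.toNat
    split_ifs <;> omega
  · rw [if_neg ha, if_pos hb, if_neg (by omega : ¬ (0:Int) ≤ a / 2),
      if_pos (by omega : (0:Int) ≤ b / 2),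
      show (b/2).toNat = b.toNat / 2 from by omega,
      show (-(a/2) - 1).toNat = (-a - 1).toNat / 2 from by omega,
      pv_N1 (-a - 1).toNat b.toNat]
    have h1 := @Nat.and_le_left ((-a - 1).toNat / 2) (b.toNat / 2)
    have h2 := @Nat.and_le_left (-a - 1).toNat b.toNat
    split_ifs <;> omega
  · rw [if_neg ha, if_neg hb,
      if_neg (by omega : ¬ (0:Int) ≤ a / 2), if_neg (by omega : ¬ (0:Int) ≤ b / 2),
      show (-(a/2) - 1).toNat = (-a - 1).toNat / 2 from by omega,
      show (-(b/2) - 1).toNat = (-b - 1).toNat / 2 from by omega,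
      pv_N1 (-a - 1).toNat (-b - 1).toNat]
    have h1 := @Nat.and_le_left (-a - 1).toNat (-b - 1).toNat
    split_ifs <;> push_cast <;> omega

-- ## bit identities used by both ports

theorem pv_band_not_aux : ∀ (n : Nat) (a : Int), a.natAbs ≤ n → PySem.Int.band a (-a - 1) = 0 := by
  intro n
  induction n with
  | zero =>
    intro a ha
    have h0 : a = 0 := by omega
    subst h0; decide
  | succ n ih =>
    intro a ha
    by_cases h0 : a = 0
    · subst h0; decide
    by_cases h1 : a = -1
    · subst h1; decide
    rw [pv_M1, if_neg (by omega), show (-a - 1) / 2 = -(a / 2) - 1 from by omega,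
      ih (a / 2) (by omega)]
    ring

theorem pv_band_not (a : Int) : PySem.Int.band a (-a - 1) = 0 :=
  pv_band_not_aux a.natAbs a le_rfl

-- a & -a for a = e·2^k with e odd: isolates the lowest set bit
theorem pv_low : ∀ (k : Nat) (e : Int), e % 2 = 1 →
    PySem.Int.band (e * 2 ^ k) (-(e * 2 ^ k)) = 2 ^ k := by
  intro k
  induction k with
  | zero =>
    intro e he
    rw [pow_zero, mul_one, pv_M1, if_pos (by constructor <;> omega),
      show (-e) / 2 = -(e / 2) - 1 from by omega, pv_band_not]
    ring
  | succ k ih =>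
    intro e he
    have h2 : e * 2 ^ (k + 1) = 2 * (e * 2 ^ k) := by ring
    rw [pv_M1, if_neg (by omega), show e * 2 ^ (k+1) / 2 = e * 2 ^ k from by omega,
      show -(e * 2 ^ (k+1)) / 2 = -(e * 2 ^ k) from by omega, ih e he]
    ring

-- x & ~(2^k - 1): keep only the bits at positions ≥ k
theorem pv_mask : ∀ (k : Nat) (X Y : Int), 0 ≤ Y → Y < 2 ^ k →
    PySem.Int.band (X * 2 ^ k + Y) (Int.not ((2:Int) ^ k - 1)) = X * 2 ^ k := by
  intro k
  induction k with
  | zero =>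
    intro X Y h0 h1
    rw [pv_not_eq]
    norm_num
    have : Y = 0 := by omega
    simp [this]
  | succ k ih =>
    intro X Y h0 h1
    have h2 : X * 2 ^ (k + 1) = 2 * (X * 2 ^ k) := by ring
    have h3 : (2:Int) ^ (k + 1) = 2 * 2 ^ k := by ring
    rw [pv_not_eq, pv_M1, if_neg (by omega),
      show (X * 2 ^ (k+1) + Y) / 2 = X * 2 ^ k + Y / 2 from by omega,
      show (-((2:Int) ^ (k+1) - 1) - 1) / 2 = -((2:Int) ^ k - 1) - 1 from by omega,
      ← pv_not_eq, ih X (Y / 2) (by omega) (by omega)]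
    omega

-- x & ~(2^k) when bit k of x is clear
theorem pv_keep : ∀ (k : Nat) (X Y : Int), 0 ≤ Y → Y < 2 ^ k →
    PySem.Int.band (X * 2 ^ (k + 1) + Y) (Int.not ((2:Int) ^ k)) = X * 2 ^ (k + 1) + Y := by
  intro k
  induction k with
  | zero =>
    intro X Y h0 h1
    have hY : Y = 0 := by omega
    subst hY
    rw [pv_not_eq, pv_M1, if_neg (by omega),
      show (X * 2 ^ (0+1) + 0) / 2 = X from by omega,
      show (-((2:Int) ^ 0) - 1) / 2 = -1 from by omega, PySem.Int.band_neg_one]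
    omega
  | succ k ih =>
    intro X Y h0 h1
    have h2 : X * 2 ^ (k + 1 + 1) = 2 * (X * 2 ^ (k + 1)) := by ring
    have h3 : (2:Int) ^ (k + 1) = 2 * 2 ^ k := by ring
    rw [pv_not_eq, pv_M1,
      show (X * 2 ^ (k+1+1) + Y) / 2 = X * 2 ^ (k+1) + Y / 2 from by omega,
      show (-((2:Int) ^ (k+1)) - 1) / 2 = -((2:Int) ^ k) - 1 from by omega,
      ← pv_not_eq, ih X (Y / 2) (by omega) (by omega)]
    split_ifs <;> omega

-- x | 2^k when bit k of x is clear
theorem pv_or : ∀ (k : Nat) (X Y : Int), 0 ≤ Y → Y < 2 ^ k →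
    PySem.Int.bor (X * 2 ^ (k + 1) + Y) ((2:Int) ^ k) = X * 2 ^ (k + 1) + 2 ^ k + Y := by
  intro k
  induction k with
  | zero =>
    intro X Y h0 h1
    have hY : Y = 0 := by omega
    subst hY
    rw [pv_M2, if_pos (by omega),
      show (X * 2 ^ (0+1) + 0) / 2 = X from by omega,
      show ((2:Int) ^ 0) / 2 = 0 from by omega, PySem.Int.bor_zero]
    omega
  | succ k ih =>
    intro X Y h0 h1
    have h2 : X * 2 ^ (k + 1 + 1) = 2 * (X * 2 ^ (k + 1)) := by ring
    have h3 : (2:Int) ^ (k + 1) = 2 * 2 ^ k := by ring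
    rw [pv_M2,
      show (X * 2 ^ (k+1+1) + Y) / 2 = X * 2 ^ (k+1) + Y / 2 from by omega,
      show ((2:Int) ^ (k+1)) / 2 = (2:Int) ^ k from by omega,
      ih X (Y / 2) (by omega) (by omega)]
    split_ifs <;> omega

-- x & ~(2^k) when bit k of x is set
theorem pv_clear : ∀ (k : Nat) (X Y : Int), 0 ≤ Y → Y < 2 ^ k →
    PySem.Int.band (X * 2 ^ (k + 1) + 2 ^ k + Y) (Int.not ((2:Int) ^ k))
      = X * 2 ^ (k + 1) + Y := by
  intro k
  induction k with
  | zero =>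
    intro X Y h0 h1
    have hY : Y = 0 := by omega
    subst hY
    rw [pv_not_eq, pv_M1, if_neg (by omega),
      show (X * 2 ^ (0+1) + 2 ^ 0 + 0) / 2 = X from by omega,
      show (-((2:Int) ^ 0) - 1) / 2 = -1 from by omega, PySem.Int.band_neg_one]
    omega
  | succ k ih =>
    intro X Y h0 h1
    have h2 : X * 2 ^ (k + 1 + 1) = 2 * (X * 2 ^ (k + 1)) := by ring
    have h3 : (2:Int) ^ (k + 1) = 2 * 2 ^ k := by ring
    rw [pv_not_eq, pv_M1,
      show (X * 2 ^ (k+1+1) + 2 ^ (k+1) + Y) / 2 = X * 2 ^ (k+1) + 2 ^ k + Y / 2 from by omega,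
      show (-((2:Int) ^ (k+1)) - 1) / 2 = -((2:Int) ^ k) - 1 from by omega,
      ← pv_not_eq, ih X (Y / 2) (by omega) (by omega)]
    split_ifs <;> omega

-- ## decomposition of a nonzero integer as (odd) · 2^t

theorem pv_decomp (m : Int) (hm : m ≠ 0) :
    ∃ (t : Nat) (e : Int), e % 2 = 1 ∧ m = e * 2 ^ t ∧
      (2:Int) ^ t ≤ m.natAbs ∧ e.natAbs ≤ m.natAbs := by
  obtain ⟨t, o, hodd, hfact⟩ := Nat.exists_eq_two_pow_mul_odd (n := m.natAbs) (by omega)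
  have ho : o % 2 = 1 := Nat.odd_iff.mp hodd
  have hpow : 0 < 2 ^ t := Nat.two_pow_pos t
  refine ⟨t, if 0 ≤ m then (o : Int) else -(o : Int), ?_, ?_, ?_, ?_⟩
  · split_ifs <;> omega
  · have hcast : (m.natAbs : Int) = (2:Int) ^ t * (o : Int) := by
      rw [hfact]; push_cast; ring
    split_ifs with h
    · have : (m.natAbs : Int) = m := by omega
      rw [← this, hcast]; ring
    · have : (m.natAbs : Int) = -m := by omega
      have : m = -(m.natAbs : Int) := by omega
      rw [this, hcast]; ring
  · have h1 : 2 ^ t ≤ m.natAbs := by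
      rw [hfact]; exact Nat.le_mul_of_pos_right _ (by omega)
    exact_mod_cast h1
  · have h1 : o ≤ m.natAbs := by
      rw [hfact]; exact Nat.le_mul_of_pos_left _ hpow
    split_ifs <;> simp <;> omega

theorem pv_pow_le_32 (t : Nat) (h : (2:Int) ^ t ≤ 2 ^ 32) : t ≤ 32 := by
  by_contra hc
  have : (2:Int) ^ 33 ≤ 2 ^ t := pow_le_pow_right₀ (by norm_num) (by omega)
  norm_num at this h; omega

-- band x 1 is the parity of x
theorem pv_band_one (x : Int) : PySem.Int.band x 1 = x % 2 := by
  rw [pv_M1, show (1:Int) / 2 = 0 from by omega, PySem.Int.band_zero]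
  split_ifs <;> omega

-- ## characterization of A's while-loop

-- phase 1: the t trailing ones are consumed one per iteration
theorem pv_P1 : ∀ (t fuel : Nat) (c o : Int) (idx : Nat),
    pvLoopA (t + fuel) (c * 2 ^ (t + 1) + 2 ^ t - 1) (-1) o idx
      = pvLoopA fuel (2 * c) (-1) (if t = 0 then o else ((idx + t - 1 : Nat) : Int)) (idx + t) := by
  intro t
  induction t with
  | zero =>
    intro fuel c o idx
    rw [show c * 2 ^ (0+1) + 2 ^ 0 - 1 = 2 * c from by ring]
    simp
  | succ t ih =>
    intro fuel c o idx
    have hX : c * 2 ^ (t + 1 + 1) + 2 ^ (t + 1) - 1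
        = 4 * (c * 2 ^ t) + 2 * 2 ^ t - 1 := by ring
    have hpos : (0:Int) < 2 ^ t := by positivity
    have h4 : c * 2 ^ (t + 1) = 2 * (c * 2 ^ t) := by ring
    have h3 : (2:Int) ^ (t + 1) = 2 * 2 ^ t := by ring
    have hne : c * 2 ^ (t + 1 + 1) + 2 ^ (t + 1) - 1 ≠ 0 := by omega
    have hmod : (c * 2 ^ (t + 1 + 1) + 2 ^ (t + 1) - 1) % 2 = 1 := by omega
    have hdiv : (c * 2 ^ (t + 1 + 1) + 2 ^ (t + 1) - 1) / 2 = c * 2 ^ (t + 1) + 2 ^ t - 1 := by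
      omega
    rw [show t + 1 + fuel = (t + fuel) + 1 from by omega]
    rw [pvLoopA]
    rw [if_neg hne, pv_band_one,
      if_neg (show ¬ ((c * 2 ^ (t + 1 + 1) + 2 ^ (t + 1) - 1) % 2 = 0) from by omega),
      if_pos hmod, if_neg (show ¬ ((-1:Int) ≥ 0) from by omega), pv_shiftr1, hdiv,
      ih fuel c (idx : Int) (idx + 1)]
    by_cases ht : t = 0
    · subst ht; simp
    · rw [if_neg ht, if_neg (show ¬ (t + 1 = 0) from by omega),
        show idx + 1 + t = idx + (t + 1) from by omega]

-- phase 2: the zeros above them are consumed, then the loop breaks at the next one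
theorem pv_P2 : ∀ (v fuel : Nat) (e z o : Int) (idx : Nat), e % 2 = 1 →
    pvLoopA (v + 2 + fuel) (e * 2 ^ (v + 1)) z o idx
      = (((idx + v : Nat) : Int), ((idx + v + 1 : Nat) : Int)) := by
  intro v
  induction v with
  | zero =>
    intro fuel e z o idx he
    have hne : e ≠ 0 := by omega
    have h1 : e * 2 ^ (0+1) = 2 * e := by ring
    rw [show 0 + 2 + fuel = (1 + fuel) + 1 from by omega, pvLoopA]
    rw [if_neg (show ¬ (e * 2 ^ (0+1) = 0) from by omega), pv_band_one,
      if_pos (show e * 2 ^ (0+1) % 2 = 0 from by omega),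
      if_neg (show ¬ (e * 2 ^ (0+1) % 2 = 1) from by omega),
      pv_shiftr1, show e * 2 ^ (0+1) / 2 = e from by omega,
      show 1 + fuel = fuel + 1 from by omega, pvLoopA]
    rw [if_neg hne, pv_band_one, if_neg (show ¬ (e % 2 = 0) from by omega), if_pos he,
      if_pos (show ((idx:Int)) ≥ 0 from by omega)]
    simp
  | succ v ih =>
    intro fuel e z o idx he
    have h2 : e * 2 ^ (v + 1 + 1) = 2 * (e * 2 ^ (v + 1)) := by ring
    have h3 : (0:Int) < 2 ^ (v+1) := by positivity
    have hne2 : e * 2 ^ (v + 1) ≠ 0 := by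
      apply mul_ne_zero (by omega); positivity
    rw [show v + 1 + 2 + fuel = (v + 2 + fuel) + 1 from by omega, pvLoopA]
    rw [if_neg (show ¬ (e * 2 ^ (v + 1 + 1) = 0) from by omega), pv_band_one,
      if_pos (show e * 2 ^ (v + 1 + 1) % 2 = 0 from by omega),
      if_neg (show ¬ (e * 2 ^ (v + 1 + 1) % 2 = 1) from by omega), pv_shiftr1,
      show e * 2 ^ (v + 1 + 1) / 2 = e * 2 ^ (v + 1) from by omega,
      ih fuel e (idx : Int) o (idx + 1) he]
    have : idx + (v + 1) = idx + 1 + v := by omega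
    rw [Prod.mk.injEq]
    constructor <;> congr 1 <;> omega

-- ## main equivalence

theorem pv_main (num : Int) (hdom : Dom_lower_value_with_the_same_number_of_ones num)
    (hpre : num ≠ -1) :
    lower_value_with_the_same_number_of_ones num
      = lower_value_with_the_same_number_of_ones_alt num := by
  unfold Dom_lower_value_with_the_same_number_of_ones pvDomInt at hdom
  rw [decide_eq_true_iff] at hdom
  by_cases hnum0 : num = 0
  · subst hnum0; decide
  obtain ⟨t, e, he, heq, hpt, hea⟩ := pv_decomp (num + 1) (by omega)
  have hna : ((num + 1).natAbs : Int) ≤ 2 ^ 32 := by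
    have : ((2:Int) ^ 32) = 4294967296 := by norm_num
    omega
  have ht32 : t ≤ 32 := pv_pow_le_32 t (le_trans hpt hna)
  set c : Int := (e - 1) / 2 with hcdef
  have hc : e = 2 * c + 1 := by omega
  have hnum : num = c * 2 ^ (t + 1) + 2 ^ t - 1 := by
    have h3 : (2:Int) ^ (t + 1) = 2 * 2 ^ t := by ring
    rw [hc] at heq
    have h4 : c * 2 ^ (t+1) = 2 * (c * 2 ^ t) := by ring
    have h5 : (2 * c + 1) * 2 ^ t = 2 * (c * 2 ^ t) + 2 ^ t := by ring
    omega
  have hpos : (0:Int) < 2 ^ t := by positivity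
  have hpos1 : (0:Int) < 2 ^ (t+1) := by positivity
  have h3 : (2:Int) ^ (t + 1) = 2 * 2 ^ t := by ring
  -- B's intermediate values
  have hz : PySem.Int.band (num + 1) (-(num + 1)) = 2 ^ t := by
    rw [heq]; exact pv_low t e he
  have hshift : ((2:Int) ^ t) <<< (1:Nat) = 2 ^ (t + 1) := by
    rw [Int.shiftLeft_eq]; ring
  have hmask : PySem.Int.band num (Int.not ((2:Int) ^ (t+1) - 1)) = c * 2 ^ (t + 1) := by
    rw [hnum, show c * 2 ^ (t+1) + 2 ^ t - 1 = c * 2 ^ (t+1) + (2 ^ t - 1) from by ring]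
    exact pv_mask (t+1) c (2 ^ t - 1) (by omega) (by omega)
  simp only [lower_value_with_the_same_number_of_ones,
    lower_value_with_the_same_number_of_ones_alt]
  rw [if_neg hnum0, if_neg hnum0, hz, hshift, hmask]
  by_cases hc0 : c = 0
  · -- num is a block of trailing ones: the loop finds no zero, B's `higher` is 0
    have ht1 : 1 ≤ t := by
      by_contra h
      have : t = 0 := by omega
      rw [this] at hnum; norm_num [hc0] at hnum; omega
    have hloop0 : pvLoopA 100 num (-1) (-1) 0 = (-1, ((0 + t - 1 : Nat) : Int)) := by
      rw [hnum, hc0, show (100:Nat) = t + (100 - t) from by omega, pv_P1,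
        show (2:Int) * 0 = 0 from by ring,
        show (100 - t : Nat) = (99 - t) + 1 from by omega, pvLoopA]
      rw [if_pos rfl, if_neg (show ¬ (t = 0) from by omega)]
    rw [hloop0, hc0]
    norm_num
  · -- general case
    obtain ⟨v, e', he', hceq, hpv, hca⟩ := pv_decomp c hc0
    have hv32 : v ≤ 32 := by
      apply pv_pow_le_32
      have h1 : c.natAbs ≤ (num + 1).natAbs := by omega
      omega
    have hpow : (2:Int) ^ v * 2 ^ (t + 1) = 2 ^ (t + v + 1) := by
      rw [← pow_add]; congr 1; omega
    have hhigher : c * 2 ^ (t + 1) = e' * 2 ^ (t + v + 1) := by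
      rw [hceq, mul_assoc, hpow]
    have hKpos : (0:Int) < 2 ^ (t + v) := by positivity
    have hK1pos : (0:Int) < 2 ^ (t + v + 1) := by positivity
    have hKe : (2:Int) ^ (t + v + 1) = 2 * 2 ^ (t + v) := by ring
    have htK : (2:Int) ^ t ≤ 2 ^ (t + v) := pow_le_pow_right₀ (by norm_num) (by omega)
    have hhne : e' * 2 ^ (t + v + 1) ≠ 0 := by
      apply mul_ne_zero (by omega); positivity
    obtain ⟨f, hf⟩ := Nat.exists_eq_add_of_le (show t + (v + 2) ≤ 100 from by omega)
    have h2c : 2 * c = e' * 2 ^ (v + 1) := by rw [hceq]; ring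
    have hloop : pvLoopA 100 num (-1) (-1) 0 = (((t + v : Nat) : Int), ((t + v + 1 : Nat) : Int)) := by
      rw [hnum, show (100:Nat) = t + (v + 2 + f) from by omega, pv_P1, h2c,
        pv_P2 v f e' _ _ (0 + t) he']
      norm_num
    rw [hloop, hhigher, if_neg hhne, pv_low (t + v + 1) e' he',
      show ((2:Int) ^ (t + v + 1)) >>> (1:Nat) = 2 ^ (t + v) from by rw [pv_shiftr1]; omega,
      if_neg (show ¬ ((((t + v : Nat) : Int))) = -1 from by omega)]
    -- the two update_bit calls
    have hnum' : num = e' * 2 ^ (t + v + 1) + (2 ^ t - 1) := by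
      rw [hnum, ← hhigher]; ring
    set d : Int := (e' - 1) / 2 with hddef
    have hd : e' = 2 * d + 1 := by omega
    simp only [pvUpdateBit]
    rw [if_neg (show ¬ (true = false) from by simp), if_pos (trivial : True),
      show (((t + v : Nat) : Int)).toNat = t + v from by omega,
      show (((t + v + 1 : Nat) : Int)).toNat = t + v + 1 from by omega,
      Int.shiftLeft_eq, Int.shiftLeft_eq, one_mul, one_mul]
    rw [show num = e' * 2 ^ (t + v + 1) + (2 ^ t - 1) from hnum']
    rw [show (t + v + 1) = (t + v) + 1 from rfl,
      pv_keep (t + v) e' (2 ^ t - 1) (by omega) (by omega),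
      pv_or (t + v) e' (2 ^ t - 1) (by omega) (by omega),
      show e' * 2 ^ (t + v + 1) + 2 ^ (t + v) + (2 ^ t - 1)
          = d * 2 ^ (t + v + 1 + 1) + 2 ^ (t + v + 1) + (2 ^ (t + v) + (2 ^ t - 1)) from by
        rw [hd]; ring,
      pv_clear (t + v + 1) d (2 ^ (t + v) + (2 ^ t - 1)) (by omega) (by omega)]
    rw [hd]; ring

-- ===== VERDICT (by name: the statement is the Claim_ definition above) =====
theorem lower_value_with_the_same_number_of_ones_spec :
    Claim_equal_lower_value_with_the_same_number_of_ones := by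
  intro num hdom hpre
  unfold Spec_lower_value_with_the_same_number_of_ones
  exact pv_main num hdom hpre
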